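-- pv_equiv track=rewrite | github.com/kenyaachon/LeetCode | trappingrainwater2.py | findHighestPt
-- ===== SOURCE A (Python) =====
-- from typing import List
--
-- def findHighestPt(heightMap: List[int]):
--     if(len(heightMap) == 0):
--         return []
--     size = len(heightMap)
--     leftMax = [0 for i in range(size + 1)]
--     rightMax = [0 for i in range(size + 1)]
--     #leftMax = []
--     #rightMax = []
--     #leftMax.append(heightMap[0])
--     leftMax[0] = heightMap[0]
--     result = []
--     for i in range(0, size):
--         leftMax[i] = max(heightMap[i], leftMax[i-1])
--         #leftMax.insert(i, max(heightMap[i], leftMax[i-1]))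
--
--     for i in reversed(range(0, size)):
--         rightMax[i] = max(heightMap[i], rightMax[i+1])
--         #rightMax.insert(i, max(heightMap[i], rightMax[i+1]))
--
--     for i in range(size):
--         result.append(min(leftMax[i], rightMax[i]))
--         #result.append(rightMax[i])
--         #result.insert(i, rightMax[i])
--
--     return result
-- ===== SOURCE B (Python) =====
-- def findHighestPt(heightMap):
--     return [min(max([0] + heightMap[:i + 1]), max([0] + heightMap[i:]))
--             for i in range(len(heightMap))]
-- ===== Notes on version B (the rewrite author's own statement) =====
-- stated objective: simpler
-- what changed: B replaces A's three precomputed-table passes (zero-initialized prefix-max and suffix-max arrays with sentinel slots, then a combining pass) by a single comprehension that recomputes each index's prefix and suffix maximum directly with max over slices, floored at 0.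
import Mathlib
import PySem

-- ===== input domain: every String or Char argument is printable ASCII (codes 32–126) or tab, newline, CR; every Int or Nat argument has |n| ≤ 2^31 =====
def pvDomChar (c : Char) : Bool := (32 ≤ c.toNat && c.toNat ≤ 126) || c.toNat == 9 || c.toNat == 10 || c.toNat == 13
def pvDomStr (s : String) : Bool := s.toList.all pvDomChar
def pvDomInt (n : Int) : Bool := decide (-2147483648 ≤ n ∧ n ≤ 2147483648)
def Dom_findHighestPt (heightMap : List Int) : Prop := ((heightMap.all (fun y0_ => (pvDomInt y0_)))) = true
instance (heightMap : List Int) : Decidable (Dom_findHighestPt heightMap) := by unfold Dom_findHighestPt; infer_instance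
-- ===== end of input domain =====

-- B replaces A's three table-building passes by per-index max over slices (simpler, not faster).

-- ===== PORT A =====
def findHighestPt (heightMap : List Int) : List Int :=
  if PySem.List.len heightMap = 0 then []
  else
    let size : Int := PySem.List.len heightMap
    let leftMax : List Int := (PySem.List.pyRange 0 (size + 1) 1).map (fun _ => 0)
    let rightMax : List Int := (PySem.List.pyRange 0 (size + 1) 1).map (fun _ => 0)
    let leftMax := PySem.List.pySetD leftMax 0 (PySem.List.pyGetD heightMap 0 0)
    let result : List Int := []
    let leftMax := (PySem.List.pyRange 0 size 1).foldl
      (fun lm i => PySem.List.pySetD lm i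
        (max (PySem.List.pyGetD heightMap i 0) (PySem.List.pyGetD lm (i - 1) 0))) leftMax
    -- reversed(range(0, size))
    let rightMax := (PySem.List.pyRange 0 size 1).reverse.foldl
      (fun rm i => PySem.List.pySetD rm i
        (max (PySem.List.pyGetD heightMap i 0) (PySem.List.pyGetD rm (i + 1) 0))) rightMax
    let result := (PySem.List.pyRange 0 size 1).foldl
      (fun r i => r ++ [min (PySem.List.pyGetD leftMax i 0) (PySem.List.pyGetD rightMax i 0)]) result
    result

-- ===== PORT B =====
-- max(xs) on a list known nonempty (head is the literal 0 below)
def pyMaxD (xs : List Int) : Int := (PySem.List.max? xs (fun x => x)).getD 0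

def findHighestPt_alt (heightMap : List Int) : List Int :=
  (PySem.List.pyRange 0 (PySem.List.len heightMap) 1).map (fun i =>
    min (pyMaxD (0 :: PySem.List.slice heightMap none (some (i + 1))))
        (pyMaxD (0 :: PySem.List.slice heightMap (some i) none)))

-- ===== PRECONDITION & SPEC =====
def Spec_findHighestPt (heightMap : List Int) (out : List Int) : Prop := out = findHighestPt_alt heightMap
instance (heightMap : List Int) (out : List Int) : Decidable (Spec_findHighestPt heightMap out) := by unfold Spec_findHighestPt; infer_instance

-- ===== CLAIM (what is proved, stated in full; the proofs are below) =====
def Claim_equal_findHighestPt : Prop := ∀ (heightMap : List Int), Dom_findHighestPt heightMap → Spec_findHighestPt heightMap (findHighestPt heightMap)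

-- ===== LEMMAS AND PROOFS =====

-- prefix max with 0 floor (A's leftMax[i]); suffix max with 0 floor (A's rightMax[i])
def pmax (hm : List Int) (k : Nat) : Int := (hm.take (k + 1)).foldl max 0
def smax (hm : List Int) (k : Nat) : Int := (hm.drop k).foldl max 0
-- contents of A's leftMax array once the first loop has processed indices < k
def Lf (hm : List Int) (k j : Nat) : Int :=
  if j < k then pmax hm j else if j = 0 then PySem.List.pyGetD hm 0 0 else 0
-- contents of A's rightMax array once the second loop has processed indices ≥ k
def Rf (hm : List Int) (k j : Nat) : Int := if k ≤ j then smax hm j else 0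

lemma set_map_range {m k : Nat} (f : Nat → Int) (v : Int) (_hk : k < m) :
    ((List.range m).map f).set k v = (List.range m).map (fun j => if j = k then v else f j) := by
  apply List.ext_getElem
  · simp
  · intro i h1 h2
    simp only [List.getElem_set, List.getElem_map, List.getElem_range]
    simp at h1
    by_cases h : i = k
    · simp [h]
    · rw [if_neg (fun hh => h hh.symm), if_neg h]

lemma pmax_zero (hm : List Int) (h : hm ≠ []) : pmax hm 0 = max (hm.getD 0 0) 0 := by
  cases hm with
  | nil => simp at h
  | cons x t => simp [pmax, max_comm]

lemma pmax_succ (hm : List Int) (k : Nat) (hk : k + 1 < hm.length) :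
    pmax hm (k + 1) = max (hm.getD (k + 1) 0) (pmax hm k) := by
  unfold pmax
  rw [List.take_add_one, List.getElem?_eq_getElem hk]
  simp only [Option.toList_some, List.foldl_append, List.foldl_cons, List.foldl_nil]
  simp [List.getD, List.getElem?_eq_getElem hk, max_comm]

lemma smax_len (hm : List Int) : smax hm hm.length = 0 := by simp [smax]

lemma smax_step (hm : List Int) (k : Nat) (hk : k < hm.length) :
    smax hm k = max (hm.getD k 0) (smax hm (k + 1)) := by
  unfold smax
  rw [List.drop_eq_getElem_cons hk]
  simp only [List.foldl_cons]
  rw [show max (0:Int) hm[k] = max hm[k] 0 from max_comm _ _, List.foldl_assoc]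
  simp [List.getD, List.getElem?_eq_getElem hk]

lemma left_loop (hm : List Int) (hn : 0 < hm.length) :
    ∀ (m k : Nat), k + m = hm.length →
    (PySem.List.pyRange (k : Int) (hm.length : Int) 1).foldl
      (fun lm i => PySem.List.pySetD lm i
        (max (PySem.List.pyGetD hm i 0) (PySem.List.pyGetD lm (i - 1) 0)))
      ((List.range (hm.length + 1)).map (Lf hm k))
    = (List.range (hm.length + 1)).map (Lf hm hm.length) := by
  intro m
  induction m with
  | zero =>
    intro k hk
    have hkn : k = hm.length := by omega
    subst hkn
    rw [PySem.List.pyRange_one_eq_nil (by omega)]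
    simp
  | succ m ih =>
    intro k hk
    rw [PySem.List.pyRange_one_cons (show (k:Int) < (hm.length:Int) by omega)]
    rw [List.foldl_cons]
    have hstep : (PySem.List.pySetD ((List.range (hm.length + 1)).map (Lf hm k)) (k : Int)
        (max (PySem.List.pyGetD hm (k : Int) 0)
             (PySem.List.pyGetD ((List.range (hm.length + 1)).map (Lf hm k)) ((k : Int) - 1) 0)))
        = (List.range (hm.length + 1)).map (Lf hm (k + 1)) := by
      have hv : (max (PySem.List.pyGetD hm (k : Int) 0)
             (PySem.List.pyGetD ((List.range (hm.length + 1)).map (Lf hm k)) ((k : Int) - 1) 0))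
          = pmax hm k := by
        cases k with
        | zero =>
          have hlen : ((List.range (hm.length + 1)).map (Lf hm 0)).length = hm.length + 1 := by simp
          rw [show ((0:Nat) : Int) - 1 = -1 by norm_num]
          rw [PySem.List.pyGetD_neg_ofNat ((List.range (hm.length + 1)).map (Lf hm 0)) 1 0
                (by omega) (by rw [hlen]; omega)]
          simp only [List.length_map, List.length_range, Nat.add_sub_cancel,
            List.getElem_map, List.getElem_range]
          simp only [Nat.cast_zero]
          rw [show Lf hm 0 hm.length = 0 by
                unfold Lf; rw [if_neg (by omega), if_neg (by omega)]]
          rw [pmax_zero hm (by intro h; rw [h] at hn; simp at hn)]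
          simp [PySem.List.pyGetD_zero]
        | succ j =>
          rw [show ((j + 1 : Nat) : Int) - 1 = (j : Int) by omega]
          simp only [PySem.List.pyGetD_natCast]
          rw [PySem.List.getD_map_range _ _ _ _ (by omega)]
          rw [show Lf hm (j + 1) j = pmax hm j by unfold Lf; simp]
          rw [pmax_succ hm j (by omega)]
      rw [hv, PySem.List.pySetD_natCast, set_map_range _ _ (show k < hm.length + 1 by omega)]
      apply List.map_congr_left
      intro j hj
      simp only [List.mem_range] at hj
      by_cases h : j = k
      · subst h; simp [Lf]
      · rw [if_neg h]
        unfold Lf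
        simp only [show (j < k) ↔ (j < k + 1) from by omega]
    rw [hstep, show ((k : Int) + 1) = ((k + 1 : Nat) : Int) by omega]
    exact ih (k + 1) (by omega)

lemma right_loop (hm : List Int) :
    ∀ (k : Nat), k ≤ hm.length →
    (PySem.List.pyRange 0 (k : Int) 1).reverse.foldl
      (fun rm i => PySem.List.pySetD rm i
        (max (PySem.List.pyGetD hm i 0) (PySem.List.pyGetD rm (i + 1) 0)))
      ((List.range (hm.length + 1)).map (Rf hm k))
    = (List.range (hm.length + 1)).map (Rf hm 0) := by
  intro k
  induction k with
  | zero =>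
    intro _
    rw [show ((0:Nat) : Int) = 0 by norm_num, PySem.List.pyRange_one_eq_nil (by omega)]
    simp
  | succ k ih =>
    intro hk
    rw [show ((k + 1 : Nat) : Int) = (k : Int) + 1 by omega]
    rw [PySem.List.pyRange_one_succ_right (by positivity)]
    rw [List.reverse_append, List.reverse_singleton, List.singleton_append, List.foldl_cons]
    have hstep : (PySem.List.pySetD ((List.range (hm.length + 1)).map (Rf hm (k + 1))) (k : Int)
        (max (PySem.List.pyGetD hm (k : Int) 0)
             (PySem.List.pyGetD ((List.range (hm.length + 1)).map (Rf hm (k + 1))) ((k : Int) + 1) 0)))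
        = (List.range (hm.length + 1)).map (Rf hm k) := by
      have hv : (max (PySem.List.pyGetD hm (k : Int) 0)
             (PySem.List.pyGetD ((List.range (hm.length + 1)).map (Rf hm (k + 1))) ((k : Int) + 1) 0))
          = smax hm k := by
        rw [show ((k : Int) + 1) = ((k + 1 : Nat) : Int) by omega]
        simp only [PySem.List.pyGetD_natCast]
        rw [PySem.List.getD_map_range _ _ _ _ (by omega)]
        rw [show Rf hm (k + 1) (k + 1) = smax hm (k + 1) by unfold Rf; simp]
        rw [smax_step hm k (by omega)]
      rw [hv, PySem.List.pySetD_natCast, set_map_range _ _ (show k < hm.length + 1 by omega)]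
      apply List.map_congr_left
      intro j hj
      simp only [List.mem_range] at hj
      by_cases h : j = k
      · subst h; simp [Rf]
      · rw [if_neg h]
        unfold Rf
        simp only [show (k + 1 ≤ j) ↔ (k ≤ j) from by omega]
    rw [hstep]
    exact ih (by omega)

lemma alt_eq (hm : List Int) :
    findHighestPt_alt hm = (List.range hm.length).map (fun j => min (pmax hm j) (smax hm j)) := by
  unfold findHighestPt_alt
  rw [PySem.List.len_eq, PySem.List.pyRange_one, List.map_map]
  simp only [Int.sub_zero, Int.toNat_natCast]
  apply List.map_congr_left
  intro j hj
  simp only [List.mem_range] at hj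
  simp only [Function.comp]
  rw [show (0 : Int) + (j : Int) = ((j : Nat) : Int) by omega]
  rw [show ((j : Int) + 1) = ((j + 1 : Nat) : Int) by omega]
  rw [PySem.List.slice_to_natCast, PySem.List.slice_from_natCast]
  unfold pyMaxD
  rw [PySem.List.max?_id_cons, PySem.List.max?_id_cons]
  simp [pmax, smax]

lemma main_eq (hm : List Int) : findHighestPt hm = findHighestPt_alt hm := by
  by_cases h0 : hm.length = 0
  · rw [List.eq_nil_of_length_eq_zero h0]
    rfl
  · have hn : 0 < hm.length := by omega
    rw [alt_eq]
    simp only [findHighestPt, PySem.List.len_eq]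
    rw [if_neg (by omega)]
    have hlm0 : PySem.List.pySetD
        ((PySem.List.pyRange 0 ((hm.length : Int) + 1) 1).map (fun _ => (0 : Int))) 0
        (PySem.List.pyGetD hm 0 0)
        = (List.range (hm.length + 1)).map (Lf hm 0) := by
      rw [PySem.List.pySetD_of_nonneg _ _ (by norm_num : (0:Int) ≤ 0)]
      rw [PySem.List.pyRange_one, List.map_map]
      rw [show (((hm.length : Int) + 1) - 0).toNat = hm.length + 1 by omega]
      rw [show ((0 : Int)).toNat = 0 by rfl]
      rw [set_map_range _ _ (show 0 < hm.length + 1 by omega)]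
      apply List.map_congr_left
      intro j hj
      unfold Lf
      rw [if_neg (Nat.not_lt_zero j)]
      by_cases h : j = 0
      · rw [if_pos h, if_pos h]
      · rw [if_neg h, if_neg h]
        rfl
    have hrm0 : ((PySem.List.pyRange 0 ((hm.length : Int) + 1) 1).map (fun _ => (0 : Int)))
        = (List.range (hm.length + 1)).map (Rf hm hm.length) := by
      rw [PySem.List.pyRange_one, List.map_map]
      rw [show (((hm.length : Int) + 1) - 0).toNat = hm.length + 1 by omega]
      apply List.map_congr_left
      intro j hj
      simp only [List.mem_range] at hj
      unfold Rf
      by_cases h : hm.length ≤ j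
      · rw [if_pos h, show j = hm.length by omega, smax_len]
        rfl
      · rw [if_neg h]
        rfl
    rw [hlm0, hrm0]
    have hL := left_loop hm hn hm.length 0 (by omega)
    rw [Nat.cast_zero] at hL
    rw [hL]
    have hR := right_loop hm hm.length le_rfl
    rw [hR]
    rw [PySem.List.foldl_append_singleton_eq_map]
    rw [PySem.List.pyRange_one, List.map_map]
    simp only [Int.sub_zero, Int.toNat_natCast]
    apply List.map_congr_left
    intro j hj
    simp only [List.mem_range] at hj
    simp only [Function.comp]
    rw [show (0 : Int) + (j : Int) = ((j : Nat) : Int) by omega]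
    simp only [PySem.List.pyGetD_natCast]
    rw [PySem.List.getD_map_range _ _ _ _ (by omega),
        PySem.List.getD_map_range _ _ _ _ (by omega)]
    rw [show Lf hm hm.length j = pmax hm j by unfold Lf; rw [if_pos hj]]
    rw [show Rf hm 0 j = smax hm j by unfold Rf; rw [if_pos (Nat.zero_le j)]]

-- ===== VERDICT (by name: the statement is the Claim_ definition above) =====
theorem findHighestPt_spec : Claim_equal_findHighestPt := by
  intro hm _
  unfold Spec_findHighestPt
  exact main_eq hm
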